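-- pv_equiv track=rewrite | github.com/PetreDev/AIS-3 | data_preparation.py | _detect_suspicious_combinations
-- ===== SOURCE A (Python) =====
-- def _detect_suspicious_combinations(url):
--     """Detect suspicious character combinations."""
--     suspicious_combos = [
--         '..',  # Path traversal
--         '//',  # Protocol confusion
--         '<?',  # PHP tags
--         '<%',  # ASP tags
--     ]
--     for combo in suspicious_combos:
--         if combo in url:
--             return 1
--     return 0
-- ===== SOURCE B (Python) =====
-- def _detect_suspicious_combinations(url):
--     """Detect suspicious character combinations by one left-to-right scan of adjacent pairs."""
--     pairs = {('.', '.'), ('/', '/'), ('<', '?'), ('<', '%')}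
--     for pair in zip(url, url[1:]):
--         if pair in pairs:
--             return 1
--     return 0
-- ===== Notes on version B (the rewrite author's own statement) =====
-- stated objective: alternative
-- what changed: B replaces A's four separate substring-membership scans with a single left-to-right pass over adjacent character pairs, checking each pair against a set; since every suspicious combo is two characters long, one scan suffices.
import Mathlib
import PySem

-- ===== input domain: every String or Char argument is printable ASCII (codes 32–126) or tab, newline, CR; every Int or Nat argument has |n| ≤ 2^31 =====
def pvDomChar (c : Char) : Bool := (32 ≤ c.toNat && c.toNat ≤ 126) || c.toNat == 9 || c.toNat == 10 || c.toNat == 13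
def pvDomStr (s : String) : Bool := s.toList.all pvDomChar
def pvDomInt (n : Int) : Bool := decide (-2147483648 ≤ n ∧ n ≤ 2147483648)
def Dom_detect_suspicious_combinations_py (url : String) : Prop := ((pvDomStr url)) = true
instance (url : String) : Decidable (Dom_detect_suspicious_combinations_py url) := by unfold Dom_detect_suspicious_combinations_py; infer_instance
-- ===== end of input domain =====

-- B replaces A's four substring scans with one pass over adjacent character pairs (alternative, same cost).

-- ===== PORT A =====
-- the 'for combo in suspicious_combos' loop: first match returns 1, exhausted list returns 0
def pvAGo (combos : List String) (url : String) : Int :=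
  match combos with
  | [] => 0
  | c :: rest => if PySem.Str.isIn c url then 1 else pvAGo rest url

def detect_suspicious_combinations_py (url : String) : Int :=
  pvAGo ["..", "//", "<?", "<%"] url

-- ===== PORT B =====
-- 'for pair in zip(url, url[1:])': scan adjacent character pairs, return 1 on first suspicious pair
def pvBGo (cs : List Char) : Int :=
  match cs with
  | a :: b :: rest =>
      if (a, b) = ('.', '.') ∨ (a, b) = ('/', '/') ∨ (a, b) = ('<', '?') ∨ (a, b) = ('<', '%') then 1
      else pvBGo (b :: rest)
  | _ => 0

def detect_suspicious_combinations_py_alt (url : String) : Int :=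
  pvBGo url.toList

-- ===== PRECONDITION & SPEC =====
def Spec_detect_suspicious_combinations_py (url : String) (out : Int) : Prop := out = detect_suspicious_combinations_py_alt url
instance (url : String) (out : Int) : Decidable (Spec_detect_suspicious_combinations_py url out) := by unfold Spec_detect_suspicious_combinations_py; infer_instance

-- ===== CLAIM (what is proved, stated in full; the proofs are below) =====
def Claim_equal_detect_suspicious_combinations_py : Prop := ∀ (url : String), Dom_detect_suspicious_combinations_py url → Spec_detect_suspicious_combinations_py url (detect_suspicious_combinations_py url)

-- ===== LEMMAS AND PROOFS =====

lemma pair_not_infix_short (a b : Char) (l : List Char) (h : l.length ≤ 1) : ¬ [a, b] <:+: l := by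
  intro hinf
  have := hinf.length_le
  simp at this
  omega

lemma pvBGo_eq_if (l : List Char) :
    pvBGo l = (if ['.', '.'] <:+: l ∨ ['/', '/'] <:+: l ∨ ['<', '?'] <:+: l ∨ ['<', '%'] <:+: l then 1 else 0) := by
  induction l with
  | nil =>
    simp [pvBGo, pair_not_infix_short _ _ [] (by simp)]
  | cons a t ih =>
    match t, ih with
    | [], _ =>
      simp [pvBGo, pair_not_infix_short _ _ [a] (by simp)]
    | b :: rest, ih =>
      have hsplit : ∀ (x y : Char), ([x, y] <:+: a :: b :: rest) ↔ ((x = a ∧ y = b) ∨ [x, y] <:+: b :: rest) := by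
        intro x y
        rw [List.infix_cons_iff]
        constructor
        · rintro (hp | hi)
          · rcases List.cons_prefix_cons.mp hp with ⟨rfl, hp2⟩
            rcases List.cons_prefix_cons.mp hp2 with ⟨rfl, _⟩
            exact Or.inl ⟨rfl, rfl⟩
          · exact Or.inr hi
        · rintro (⟨rfl, rfl⟩ | hi)
          · exact Or.inl (List.cons_prefix_cons.mpr ⟨rfl, List.cons_prefix_cons.mpr ⟨rfl, List.nil_prefix⟩⟩)
          · exact Or.inr hi
      simp only [pvBGo, ih, hsplit]
      by_cases h1 : (a, b) = ('.', '.') ∨ (a, b) = ('/', '/') ∨ (a, b) = ('<', '?') ∨ (a, b) = ('<', '%')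
      · have hc : ('.' = a ∧ '.' = b ∨ ['.', '.'] <:+: b :: rest) ∨
            ('/' = a ∧ '/' = b ∨ ['/', '/'] <:+: b :: rest) ∨
              ('<' = a ∧ '?' = b ∨ ['<', '?'] <:+: b :: rest) ∨
                ('<' = a ∧ '%' = b ∨ ['<', '%'] <:+: b :: rest) := by
          rcases h1 with h | h | h | h <;> (injection h with ha hb; subst ha; subst hb; tauto)
        rw [if_pos h1, if_pos hc]
      · rw [if_neg h1]
        refine if_congr (Iff.intro ?_ ?_) rfl rfl
        · rintro (h | h | h | h)
          · exact Or.inl (Or.inr h)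
          · exact Or.inr (Or.inl (Or.inr h))
          · exact Or.inr (Or.inr (Or.inl (Or.inr h)))
          · exact Or.inr (Or.inr (Or.inr (Or.inr h)))
        · rintro ((⟨rfl, rfl⟩ | h) | (⟨rfl, rfl⟩ | h) | (⟨rfl, rfl⟩ | h) | (⟨rfl, rfl⟩ | h))
          · exact absurd (Or.inl rfl) h1
          · exact Or.inl h
          · exact absurd (Or.inr (Or.inl rfl)) h1
          · exact Or.inr (Or.inl h)
          · exact absurd (Or.inr (Or.inr (Or.inl rfl))) h1
          · exact Or.inr (Or.inr (Or.inl h))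
          · exact absurd (Or.inr (Or.inr (Or.inr rfl))) h1
          · exact Or.inr (Or.inr (Or.inr h))

-- ===== VERDICT (by name: the statement is the Claim_ definition above) =====
theorem detect_suspicious_combinations_py_spec : Claim_equal_detect_suspicious_combinations_py := by
  intro url _
  unfold Spec_detect_suspicious_combinations_py detect_suspicious_combinations_py detect_suspicious_combinations_py_alt
  rw [pvBGo_eq_if]
  simp only [pvAGo, PySem.Str.isIn_iff_infix]
  have h1 : (".." : String).toList = ['.', '.'] := rfl
  have h2 : ("//" : String).toList = ['/', '/'] := rfl
  have h3 : ("<?" : String).toList = ['<', '?'] := rfl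
  have h4 : ("<%" : String).toList = ['<', '%'] := rfl
  rw [h1, h2, h3, h4]
  split_ifs <;> tauto
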